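-- pv_equiv track=rewrite | github.com/sofiacolombo/advent-code | 03-12/joltage-part-two.py | twelveBatteries
-- ===== SOURCE A (Python) =====
-- def twelveBatteries(digits, index, count, tot):
--     end = len(digits) - (12-count) + 1
--
--     if count == 12 or index >= len(digits):
--         return tot
--
--     elif index+1 >= end:
--         sum = 0
--         for i in range(12-count):
--             sum += digits[index+1+i]*(10**(12-count-1-i))
--         return tot + sum
--
--     new_max = max(digits[index+1:end])
--     i = index + 1 + digits[index+1:end].index(new_max)
--
--     num = new_max*(10**(12-count))
--
--     return twelveBatteries(digits, i, count+1, tot+num)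
-- ===== SOURCE B (Python) =====
-- def twelveBatteries(digits, index, count, tot):
--     if count == 12 or index >= len(digits):
--         return tot
--     k = 12 - count
--     rest = digits[index+1:]
--     stack = []
--     drop = len(rest) - k
--     for d in rest:
--         while stack and drop > 0 and stack[-1] < d:
--             stack.pop()
--             drop -= 1
--         stack.append(d)
--     val = 0
--     for d in stack[:k]:
--         val = val * 10 + d
--     return tot + val * 10
-- ===== Notes on version B (the rewrite author's own statement) =====
-- stated objective: alternative
-- what changed: Replaces the 12-level recursion that rescans and re-slices the list to find each window maximum with a single monotonic-stack pass (the classic maximum-subsequence-of-length-k algorithm) followed by one pass turning the kept digits into a number.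
-- outside the precondition, e.g. on twelveBatteries([8, 4], -12, 10, 0): A returns 880, B returns 840; on twelveBatteries([5, 3, 8, 1, 2], -3, 11, 0): A returns 20, B returns 20
import Mathlib
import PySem

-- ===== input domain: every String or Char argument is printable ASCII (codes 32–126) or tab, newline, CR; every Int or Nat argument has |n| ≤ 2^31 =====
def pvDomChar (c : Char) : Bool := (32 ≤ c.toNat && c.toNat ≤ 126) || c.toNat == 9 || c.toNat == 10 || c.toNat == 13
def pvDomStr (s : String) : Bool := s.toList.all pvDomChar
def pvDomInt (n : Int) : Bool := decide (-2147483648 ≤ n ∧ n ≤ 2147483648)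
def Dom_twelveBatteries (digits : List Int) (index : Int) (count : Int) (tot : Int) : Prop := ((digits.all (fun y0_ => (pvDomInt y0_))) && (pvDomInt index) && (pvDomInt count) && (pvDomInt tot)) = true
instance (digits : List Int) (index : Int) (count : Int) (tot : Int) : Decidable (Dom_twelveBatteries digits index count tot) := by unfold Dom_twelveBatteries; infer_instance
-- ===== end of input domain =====

-- B replaces A's 12-level rescan-and-slice recursion by a single monotonic-stack pass
-- (maximum length-k subsequence); equivalence is about the RETURN value (neither mutates).

-- ===== PORT A =====
-- literal transliteration of A; the branch-2 loop uses pyGetD (Python raises IndexError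
-- out of range there — such inputs are outside Pre_), 10**e uses .toNat (e < 0 is a float
-- in Python, only reachable outside Pre_), and an empty-slice max() (ValueError) yields tot.
def twelveBatteries (digits : List Int) (index : Int) (count : Int) (tot : Int) : Int :=
  let end_ : Int := (digits.length : Int) - (12 - count) + 1
  if h1 : count = 12 ∨ index ≥ (digits.length : Int) then tot
  else if index + 1 ≥ end_ then
    tot + (PySem.List.pyRange 0 (12 - count) 1).foldl
      (fun s i => s + PySem.List.pyGetD digits (index + 1 + i) 0 * 10 ^ (12 - count - 1 - i).toNat) 0
  else
    match PySem.List.max? (PySem.List.slice digits (some (index + 1)) (some end_)) (fun y => y) with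
    | none => tot       -- Python: ValueError on empty slice; outside Pre_
    | some new_max =>
      match PySem.List.index? (PySem.List.slice digits (some (index + 1)) (some end_)) new_max with
      | none => tot     -- unreachable: new_max is a member of the slice
      | some j =>
        twelveBatteries digits (index + 1 + (j : Int)) (count + 1)
          (tot + new_max * 10 ^ (12 - count).toNat)
termination_by ((digits.length : Int) - index).toNat
decreasing_by
  push_neg at h1
  omega

-- ===== PORT B =====
-- the inner 'while stack and drop > 0 and stack[-1] < d: stack.pop(); drop -= 1' loop
def popLoop (stack : List Int) (dropn : Int) (d : Int) : List Int × Int :=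
  match h : stack.getLast? with
  | none => (stack, dropn)
  | some t =>
    if dropn > 0 ∧ t < d then popLoop stack.dropLast (dropn - 1) d else (stack, dropn)
termination_by stack.length
decreasing_by
  have hne : stack ≠ [] := by intro he; subst he; simp at h
  have := List.length_pos_of_ne_nil hne
  simp [List.length_dropLast]
  omega

def twelveBatteries_alt (digits : List Int) (index : Int) (count : Int) (tot : Int) : Int :=
  if count = 12 ∨ index ≥ (digits.length : Int) then tot
  else
    let k : Int := 12 - count
    let rest := PySem.List.slice digits (some (index + 1)) none
    let p := rest.foldl (fun (p : List Int × Int) d =>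
      let q := popLoop p.1 p.2 d
      (q.1 ++ [d], q.2)) ([], (rest.length : Int) - k)
    tot + (PySem.List.slice p.1 none (some k)).foldl (fun v d => v * 10 + d) 0 * 10

-- ===== PRECONDITION & SPEC =====
-- Pre_ excludes (a) inputs where A raises (IndexError in the near-end branch, ValueError
-- from max()/the eventual empty slice when count > 12) and (b) inputs with index ≤ -2,
-- where Python's negative-slice wraparound gives accidental values no caller would specify.
def Pre_twelveBatteries (digits : List Int) (index : Int) (count : Int) (tot : Int) : Prop :=
  count = 12 ∨ (digits.length : Int) ≤ index ∨
    (-1 ≤ index ∧ count < 12 ∧ index + 1 < (digits.length : Int) - (12 - count) + 1)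
instance (digits : List Int) (index : Int) (count : Int) (tot : Int) : Decidable (Pre_twelveBatteries digits index count tot) := by unfold Pre_twelveBatteries; infer_instance

def pvWitness_twelveBatteries : List Int × Int × Int × Int :=
  ([9, 8, 7, 6, 5, 4, 3, 2, 1, 0, 1, 2, 3], -1, 0, 0)

def Spec_twelveBatteries (digits : List Int) (index : Int) (count : Int) (tot : Int) (out : Int) : Prop := out = twelveBatteries_alt digits index count tot
instance (digits : List Int) (index : Int) (count : Int) (tot : Int) (out : Int) : Decidable (Spec_twelveBatteries digits index count tot out) := by unfold Spec_twelveBatteries; infer_instance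

-- ===== CLAIM (what is proved, stated in full; the proofs are below) =====
def Claim_equal_twelveBatteries : Prop := ∀ (digits : List Int) (index : Int) (count : Int) (tot : Int), Dom_twelveBatteries digits index count tot → Pre_twelveBatteries digits index count tot → Spec_twelveBatteries digits index count tot (twelveBatteries digits index count tot)

-- ===== LEMMAS AND PROOFS =====

-- proof-side model of B's pass, with the stack kept head-as-top and the drop counter a Nat
def popW (d : Int) : List Int → Nat → List Int × Nat
  | t :: st, dr + 1 => if t < d then popW d st dr else (t :: st, dr + 1)
  | st, dr => (st, dr)

def passS (l : List Int) (st : List Int) (dr : Nat) : List Int :=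
  match l with
  | [] => st
  | d :: ds => passS ds (d :: (popW d st dr).1) (popW d st dr).2

def passD (l : List Int) (st : List Int) (dr : Nat) : Nat :=
  match l with
  | [] => dr
  | d :: ds => passD ds (d :: (popW d st dr).1) (popW d st dr).2

def stackSel (rest : List Int) (k : Nat) : List Int :=
  ((passS rest [] (rest.length - k)).reverse).take k

def valOf (xs : List Int) : Int := xs.foldl (fun v d => v * 10 + d) 0

lemma popW_count (d : Int) : ∀ (st : List Int) (dr : Nat),
    (popW d st dr).2 + st.length = dr + (popW d st dr).1.length := by
  intro st
  induction st with
  | nil => intro dr; simp [popW]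
  | cons t st ih =>
    intro dr
    cases dr with
    | zero => simp [popW]
    | succ dd =>
      simp only [popW]
      split_ifs with h
      · have := ih dd
        simp only [List.length_cons]
        omega
      · simp

lemma popW_mem (d : Int) : ∀ (st : List Int) (dr : Nat) (x : Int),
    x ∈ (popW d st dr).1 → x ∈ st := by
  intro st
  induction st with
  | nil => intro dr x hx; simpa [popW] using hx
  | cons t st ih =>
    intro dr x hx
    cases dr with
    | zero => simpa [popW] using hx
    | succ dd =>
      simp only [popW] at hx
      split_ifs at hx with h
      · exact List.mem_cons_of_mem t (ih dd x hx)
      · simpa using hx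

lemma popW_clear (m : Int) : ∀ (st : List Int) (dr : Nat),
    (∀ x ∈ st, x < m) → st.length ≤ dr → popW m st dr = ([], dr - st.length) := by
  intro st
  induction st with
  | nil => intro dr _ _; simp [popW]
  | cons t st ih =>
    intro dr h hlen
    cases dr with
    | zero => simp at hlen
    | succ dd =>
      simp only [popW]
      rw [if_pos (h t (by simp))]
      rw [ih dd (fun x hx => h x (List.mem_cons_of_mem t hx))
            (by simp only [List.length_cons] at hlen; omega)]
      have : dd - st.length = dd + 1 - (st.length + 1) := by omega
      rw [this]
      simp

lemma popW_append (d m : Int) : ∀ (st : List Int) (dr : Nat),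
    (d ≤ m ∨ dr ≤ st.length) →
    popW d (st ++ [m]) dr = ((popW d st dr).1 ++ [m], (popW d st dr).2) := by
  intro st
  induction st with
  | nil =>
    intro dr h
    cases dr with
    | zero => simp [popW]
    | succ dd =>
      have hd : d ≤ m := by
        rcases h with h | h
        · exact h
        · simp at h
      simp [popW, not_lt.mpr hd]
  | cons t st ih =>
    intro dr h
    cases dr with
    | zero => simp [popW]
    | succ dd =>
      simp only [List.cons_append, popW]
      split_ifs with hlt
      · refine ih dd ?_
        rcases h with h | h
        · exact Or.inl h
        · right; simp only [List.length_cons] at h; omega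
      · simp

lemma passS_sim (m : Int) : ∀ (ds st : List Int) (dr : Nat),
    (∀ x ∈ ds.take (dr - st.length), x ≤ m) →
    passS ds (st ++ [m]) dr = passS ds st dr ++ [m] := by
  intro ds
  induction ds with
  | nil => intro st dr _; simp [passS]
  | cons d ds ih =>
    intro st dr h
    have hcond : d ≤ m ∨ dr ≤ st.length := by
      by_cases hc : dr ≤ st.length
      · exact Or.inr hc
      · left
        apply h
        have h1 : dr - st.length ≠ 0 := by omega
        rcases Nat.exists_eq_succ_of_ne_zero h1 with ⟨s, hs⟩
        rw [hs]
        simp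
    simp only [passS]
    rw [popW_append d m st dr hcond]
    have hstep : (d :: ((popW d st dr).1 ++ [m])) = (d :: (popW d st dr).1) ++ [m] := by simp
    simp only
    rw [hstep]
    apply ih
    intro x hx
    have hc := popW_count d st dr
    have harg : (popW d st dr).2 - (d :: (popW d st dr).1).length = dr - st.length - 1 := by
      simp only [List.length_cons] at hc ⊢
      omega
    rw [harg] at hx
    apply h
    have h1 : dr - st.length ≠ 0 := by
      intro h0
      rw [h0] at hx
      simp at hx
    rcases Nat.exists_eq_succ_of_ne_zero h1 with ⟨s, hs⟩
    rw [hs] at hx ⊢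
    simp only [List.take_succ_cons, List.mem_cons]
    right
    simpa using hx

lemma passS_phase1 (m : Int) (rest' : List Int) : ∀ (pre st : List Int) (dr : Nat),
    (∀ x ∈ pre, x < m) → (∀ x ∈ st, x < m) → st.length + pre.length ≤ dr →
    passS (pre ++ m :: rest') st dr = passS rest' [m] (dr - st.length - pre.length) := by
  intro pre
  induction pre with
  | nil =>
    intro st dr _ hst hlen
    simp only [List.nil_append, passS]
    rw [popW_clear m st dr hst (by simpa using hlen)]
    simp
  | cons e pre ih =>
    intro st dr hpre hst hlen
    have hcnt := popW_count e st dr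
    simp only [List.cons_append, passS]
    rw [ih (e :: (popW e st dr).1) (popW e st dr).2
          (fun x hx => hpre x (List.mem_cons_of_mem e hx))
          (by
            intro x hx
            rcases List.mem_cons.mp hx with rfl | hx2
            · exact hpre x (by simp)
            · exact hst x (popW_mem e st dr x hx2))
          (by simp only [List.length_cons] at hlen hcnt ⊢; omega)]
    congr 1
    simp only [List.length_cons] at hlen hcnt ⊢
    omega

lemma passS_len : ∀ (ds st : List Int) (dr : Nat),
    st.length + ds.length ≤ (passS ds st dr).length + dr := by
  intro ds
  induction ds with
  | nil => intro st dr; simp [passS]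
  | cons d ds ih =>
    intro st dr
    simp only [passS]
    have h1 := ih (d :: (popW d st dr).1) (popW d st dr).2
    have h2 := popW_count d st dr
    simp only [List.length_cons] at h1 h2 ⊢
    omega

lemma stackSel_cons (rest : List Int) (kk jn : Nat) (m : Int)
    (hn : kk + 1 ≤ rest.length) (hj : jn + kk + 1 ≤ rest.length)
    (hjn : jn < rest.length)
    (hm : rest[jn] = m)
    (hfirst : ∀ q (hq : q < jn), rest[q] < m)
    (hmax : ∀ x ∈ rest.take (rest.length - kk), x ≤ m) :
    stackSel rest (kk + 1) = m :: stackSel (rest.drop (jn + 1)) kk := by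
  have hsplit : rest = rest.take jn ++ m :: rest.drop (jn + 1) := by
    conv_lhs => rw [← List.take_append_drop jn rest]
    rw [List.drop_eq_getElem_cons hjn, hm]
  have htklen : (rest.take jn).length = jn := by
    rw [List.length_take]
    omega
  have hpre : ∀ x ∈ rest.take jn, x < m := by
    intro x hx
    rcases List.mem_iff_getElem.mp hx with ⟨i, hi, hix⟩
    rw [List.getElem_take] at hix
    rw [htklen] at hi
    rw [← hix]
    exact hfirst i hi
  have hpass : passS rest [] (rest.length - (kk + 1))
      = passS (rest.drop (jn + 1)) [] (rest.length - (kk + 1) - jn) ++ [m] := by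
    calc passS rest [] (rest.length - (kk + 1))
        = passS (rest.take jn ++ m :: rest.drop (jn + 1)) [] (rest.length - (kk + 1)) := by
          rw [← hsplit]
      _ = passS (rest.drop (jn + 1)) [m] (rest.length - (kk + 1) - 0 - jn) := by
          rw [passS_phase1 m (rest.drop (jn + 1)) (rest.take jn) [] (rest.length - (kk + 1))
                hpre (by simp) (by simp only [List.length_nil, htklen]; omega)]
          rw [htklen]
          norm_num
      _ = passS (rest.drop (jn + 1)) [] (rest.length - (kk + 1) - jn) ++ [m] := by
          have harg : rest.length - (kk + 1) - 0 - jn = rest.length - (kk + 1) - jn := by omega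
          rw [harg]
          have h0 : passS (rest.drop (jn + 1)) ([] ++ [m]) (rest.length - (kk + 1) - jn)
              = passS (rest.drop (jn + 1)) [] (rest.length - (kk + 1) - jn) ++ [m] := by
            apply passS_sim
            intro x hx
            simp only [List.length_nil, Nat.sub_zero] at hx
            have hdt : (rest.drop (jn + 1)).take (rest.length - (kk + 1) - jn)
                = (rest.take (rest.length - kk)).drop (jn + 1) := by
              rw [List.drop_take]
              congr 1
              omega
            rw [hdt] at hx
            exact hmax x (List.mem_of_mem_drop hx)
          simpa using h0
  unfold stackSel
  rw [hpass]
  rw [List.reverse_append]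
  simp only [List.reverse_cons, List.reverse_nil, List.nil_append, List.singleton_append,
    List.take_succ_cons]
  have harg : rest.length - (kk + 1) - jn = (rest.drop (jn + 1)).length - kk := by
    rw [List.length_drop]
    omega
  rw [harg]

lemma stackSel_length (rest : List Int) (k : Nat) (hk : k ≤ rest.length) :
    (stackSel rest k).length = k := by
  unfold stackSel
  rw [List.length_take, List.length_reverse]
  have h := passS_len rest [] (rest.length - k)
  simp only [List.length_nil, Nat.zero_add] at h
  omega

lemma valOf_aux : ∀ (xs : List Int) (a : Int),
    xs.foldl (fun v d => v * 10 + d) a = a * 10 ^ xs.length + valOf xs := by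
  intro xs
  induction xs with
  | nil => intro a; simp [valOf]
  | cons d xs ih =>
    intro a
    simp only [List.foldl_cons, List.length_cons, valOf] at *
    rw [ih (a * 10 + d), ih (0 * 10 + d)]
    ring

lemma valOf_cons (m : Int) (xs : List Int) :
    valOf (m :: xs) = m * 10 ^ xs.length + valOf xs := by
  have h := valOf_aux xs (0 * 10 + m)
  simp only [valOf, List.foldl_cons] at h ⊢
  rw [h]
  ring_nf

lemma A_eq : ∀ (k : Nat) (digits : List Int) (index count tot : Int),
    12 - count = (k : Int) → -1 ≤ index →
    (k : Int) ≤ (digits.length : Int) - (index + 1) →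
    twelveBatteries digits index count tot
      = tot + 10 * valOf (stackSel (digits.drop (index + 1).toNat) k) := by
  intro k
  induction k with
  | zero =>
    intro digits index count tot hk hidx hlen
    have hc : count = 12 := by omega
    rw [twelveBatteries]
    rw [dif_pos (Or.inl hc)]
    simp [stackSel, valOf]
  | succ kk ih =>
    intro digits index count tot hk hidx hlen
    push_cast at hk hlen
    have hig : ¬ (count = 12 ∨ index ≥ (digits.length : Int)) := by
      simp only [not_or, not_le]
      exact ⟨by omega, by omega⟩
    rw [twelveBatteries]
    rw [dif_neg hig]
    have hend : ¬ (index + 1 ≥ (digits.length : Int) - (12 - count) + 1) := by omega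
    rw [if_neg hend]
    have h0 : (0 : Int) ≤ index + 1 := by omega
    have hend0 : (0 : Int) ≤ (digits.length : Int) - (12 - count) + 1 := by omega
    rw [PySem.List.slice_toNat digits h0 hend0]
    set rest := digits.drop (index + 1).toNat with hrest
    have hidxnat : ((index + 1).toNat : Int) = index + 1 := Int.toNat_of_nonneg h0
    have hrlen : (rest.length : Int) = (digits.length : Int) - (index + 1) := by
      rw [hrest, List.length_drop]
      push_cast
      omega
    have hw : ((digits.length : Int) - (12 - count) + 1).toNat - (index + 1).toNat
        = rest.length - kk := by omega
    rw [hw]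
    set w := rest.take (rest.length - kk) with hwdef
    have hwlen : w.length = rest.length - kk := by
      rw [hwdef, List.length_take]
      omega
    have hwne : w ≠ [] := by
      intro hemp
      have := congrArg List.length hemp
      rw [hwlen] at this
      simp at this
      omega
    obtain ⟨m, hmx⟩ : ∃ m, PySem.List.max? w (fun y => y) = some m := by
      cases hx : PySem.List.max? w (fun y => y) with
      | none => exact absurd ((PySem.List.max?_eq_none_iff w (fun y => y)).mp hx) hwne
      | some m => exact ⟨m, rfl⟩
    rw [hmx]
    dsimp only
    have hmmem : m ∈ w := PySem.List.max?_mem hmx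
    have hmmax : ∀ y ∈ w, y ≤ m := by
      intro y hy
      exact PySem.List.max?_isMax hmx y hy
    obtain ⟨j, hj⟩ : ∃ j, PySem.List.index? w m = some j := by
      cases hx : PySem.List.index? w m with
      | none => exact absurd ((PySem.List.index?_eq_none_iff w m).mp hx) (by simp; exact hmmem)
      | some j => exact ⟨j, rfl⟩
    rw [hj]
    dsimp only
    obtain ⟨hjlt, hwj, hwfirst⟩ := PySem.List.getElem_of_index?_eq_some hj
    -- facts about j in rest
    have hjr : j < rest.length := by omega
    have hmr : rest[j] = m := by
      rw [← hwj]
      simp only [hwdef, List.getElem_take]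
    have hfr : ∀ q (hq : q < j), rest[q] < m := by
      intro q hq
      have hqw : q < w.length := by omega
      have hne : w[q] ≠ m := hwfirst q hq
      have hle : w[q] ≤ m := hmmax _ (List.getElem_mem hqw)
      simp only [hwdef, List.getElem_take] at hne hle
      omega
    -- the recursive call via ih
    have hrec := ih digits (index + 1 + (j : Int)) (count + 1)
      (tot + m * 10 ^ (12 - count).toNat)
      (by push_cast; omega) (by omega)
      (by
        push_cast
        have : (j : Int) < (rest.length : Int) - kk := by
          rw [hwlen] at hjlt
          omega
        omega)
    rw [hrec]
    have hdd : digits.drop (index + 1 + (j : Int) + 1).toNat = rest.drop (j + 1) := by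
      rw [hrest, List.drop_drop]
      congr 1
      omega
    rw [hdd]
    have hsel : stackSel rest (kk + 1) = m :: stackSel (rest.drop (j + 1)) kk := by
      apply stackSel_cons rest kk j m
      · omega
      · rw [hwlen] at hjlt; omega
      · exact hmr
      · exact hfr
      · exact hmmax
    rw [hsel]
    have hsublen : (stackSel (rest.drop (j + 1)) kk).length = kk := by
      apply stackSel_length
      rw [List.length_drop]
      rw [hwlen] at hjlt
      omega
    rw [valOf_cons, hsublen]
    have hpow : (12 - count).toNat = kk + 1 := by omega
    rw [hpow]
    ring

lemma popLoop_concat (l : List Int) (t dropn d : Int) :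
    popLoop (l ++ [t]) dropn d
      = if dropn > 0 ∧ t < d then popLoop (l ++ [t]).dropLast (dropn - 1) d
        else (l ++ [t], dropn) := by
  rw [popLoop]
  split
  · next heq =>
    rw [List.getLast?_concat] at heq
    cases heq
  · next t' heq =>
    rw [List.getLast?_concat] at heq
    cases heq
    rfl

lemma popLoop_eq (d : Int) : ∀ (stR : List Int) (dr : Nat),
    popLoop stR.reverse (dr : Int) d = ((popW d stR dr).1.reverse, ((popW d stR dr).2 : Int)) := by
  intro stR
  induction stR with
  | nil => intro dr; simp [popLoop, popW]
  | cons t stR ih =>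
    intro dr
    simp only [List.reverse_cons]
    rw [popLoop_concat]
    cases dr with
    | zero =>
      rw [if_neg (by simp)]
      rw [show popW d (t :: stR) 0 = (t :: stR, 0) from rfl, List.reverse_cons]
    | succ dd =>
      by_cases hlt : t < d
      · rw [if_pos ⟨by push_cast; omega, hlt⟩, List.dropLast_concat]
        have harg : ((dd + 1 : Nat) : Int) - 1 = ((dd : Nat) : Int) := by push_cast; ring
        rw [harg, ih dd]
        simp only [popW, if_pos hlt]
      · rw [if_neg (by simp [hlt])]
        simp only [popW, if_neg hlt]
        rw [List.reverse_cons]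

lemma fold_eq : ∀ (ds stR : List Int) (dr : Nat),
    ds.foldl (fun (p : List Int × Int) d =>
      let q := popLoop p.1 p.2 d
      (q.1 ++ [d], q.2)) (stR.reverse, (dr : Int))
      = ((passS ds stR dr).reverse, ((passD ds stR dr : Nat) : Int)) := by
  intro ds
  induction ds with
  | nil => intro stR dr; simp [passS, passD]
  | cons d ds ih =>
    intro stR dr
    simp only [List.foldl_cons]
    rw [popLoop_eq d stR dr]
    rw [show (popW d stR dr).1.reverse ++ [d] = (d :: (popW d stR dr).1).reverse from
      (List.reverse_cons ..).symm]
    rw [ih (d :: (popW d stR dr).1) (popW d stR dr).2]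
    simp [passS, passD]

-- ===== VERDICT (by name: the statement is the Claim_ definition above) =====
theorem twelveBatteries_spec : Claim_equal_twelveBatteries := by
  intro digits index count tot hdom hpre
  unfold Spec_twelveBatteries
  rcases hpre with hc | hi | ⟨h1, h2, h3⟩
  · rw [twelveBatteries, twelveBatteries_alt]
    rw [dif_pos (Or.inl hc), if_pos (Or.inl hc)]
  · rw [twelveBatteries, twelveBatteries_alt]
    rw [dif_pos (Or.inr hi), if_pos (Or.inr hi)]
  · have hig : ¬ (count = 12 ∨ index ≥ (digits.length : Int)) := by
      simp only [not_or, not_le]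
      exact ⟨by omega, by omega⟩
    set k : Nat := (12 - count).toNat with hkdef
    rw [A_eq k digits index count tot (by omega) (by omega) (by omega)]
    simp only [twelveBatteries_alt]
    rw [if_neg hig]
    rw [PySem.List.slice_from digits (show (0 : Int) ≤ index + 1 by omega)]
    set rest := digits.drop (index + 1).toNat with hrest
    have hrlen : (rest.length : Int) = (digits.length : Int) - (index + 1) := by
      rw [hrest, List.length_drop]
      push_cast
      omega
    have hinit : (rest.length : Int) - (12 - count) = ((rest.length - k : Nat) : Int) := by omega
    rw [hinit]
    have hfe := fold_eq rest [] (rest.length - k)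
    simp only [List.reverse_nil] at hfe
    rw [hfe]
    rw [PySem.List.slice_to ((passS rest [] (rest.length - k)).reverse)
      (show (0 : Int) ≤ 12 - count by omega)]
    rw [show (12 - count).toNat = k from rfl]
    unfold stackSel valOf
    ring
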